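-- pv_equiv track=rewrite | github.com/AdithyaRajagopalan24/LeetcodeAnswers | 3806-maximum-bitwise-and-after-increment-operations/3806-maximum-bitwise-and-after-increment-operations.py | maximumAND
-- ===== SOURCE A (Python) =====
-- from typing import List
--
-- def maximumAND(numbers: List[int], budget: int, count: int) -> int:
--     result = 0
--
--     for bit in range(30, -1, -1):
--         candidate = result | (1 << bit)
--         upgradeCosts = []
--
--         for value in numbers:
--             updatedValue = value
--             cost = 0
--
--             for pos in range(30, bit - 1, -1):
--                 if (candidate >> pos) & 1 and not ((updatedValue >> pos) & 1):
--                     nextValue = ((updatedValue >> pos) | 1) << pos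
--                     cost += nextValue - updatedValue
--                     updatedValue = nextValue
--
--             upgradeCosts.append(cost)
--
--         upgradeCosts.sort()
--         if sum(upgradeCosts[:count]) <= budget:
--             result = candidate
--
--     return result
-- ===== SOURCE B (Python) =====
-- def maximumAND(numbers, budget, count):
--     result = 0
--     cur = list(numbers)  # numbers[i] upgraded to carry every bit of result
--     for bit in range(30, -1, -1):
--         trial = [v if (v >> bit) & 1 else ((v >> bit) | 1) << bit for v in cur]
--         cost = sum(sorted(w - v for w, v in zip(trial, numbers))[:count])
--         if cost <= budget:
--             result |= 1 << bit
--             cur = trial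
--     return result
-- ===== Notes on version B (the rewrite author's own statement) =====
-- stated objective: faster
-- what changed: Instead of re-deriving each element's upgraded value from scratch with an inner loop over all 31 higher bit positions at every outer bit, B carries the per-element upgraded values incrementally across the outer loop (committing the trial values only when a bit is accepted), so each bit costs one O(1) step per element plus the sort.
import Mathlib
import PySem

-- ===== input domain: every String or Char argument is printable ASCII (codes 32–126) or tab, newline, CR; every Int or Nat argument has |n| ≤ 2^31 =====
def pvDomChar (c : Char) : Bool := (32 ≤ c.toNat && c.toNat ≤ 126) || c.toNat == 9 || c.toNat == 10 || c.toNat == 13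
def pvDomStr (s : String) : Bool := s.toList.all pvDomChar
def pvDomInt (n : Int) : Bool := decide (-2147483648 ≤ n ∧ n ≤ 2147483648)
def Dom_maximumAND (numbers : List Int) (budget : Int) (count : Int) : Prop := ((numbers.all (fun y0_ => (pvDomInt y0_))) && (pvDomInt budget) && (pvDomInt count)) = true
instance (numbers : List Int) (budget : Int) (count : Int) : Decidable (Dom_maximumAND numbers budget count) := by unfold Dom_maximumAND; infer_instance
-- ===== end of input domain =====

-- B keeps the per-element upgraded values incrementally across the outer bit loop instead of
-- recomputing them with an inner 31-position loop at every bit (objective: faster, constant factor).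

-- ===== PORT A =====
def maximumAND (numbers : List Int) (budget : Int) (count : Int) : Int :=
  (PySem.List.pyRange 30 (-1) (-1)).foldl (fun result bit =>
    let candidate := PySem.Int.bor result ((1 : Int) <<< bit.toNat)
    let upgradeCosts := numbers.foldl (fun acc value =>
      let st := (PySem.List.pyRange 30 (bit - 1) (-1)).foldl (fun (st : Int × Int) pos =>
        if PySem.Int.band (candidate >>> pos.toNat) 1 ≠ 0 ∧ PySem.Int.band (st.1 >>> pos.toNat) 1 = 0 then
          let nextValue := (PySem.Int.bor (st.1 >>> pos.toNat) 1) <<< pos.toNat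
          (nextValue, st.2 + (nextValue - st.1))
        else st) (value, 0)
      acc ++ [st.2]) []
    if (PySem.List.slice (PySem.List.sorted upgradeCosts id) none (some count)).sum ≤ budget then
      candidate
    else result) 0

-- ===== PORT B =====
def maximumAND_alt (numbers : List Int) (budget : Int) (count : Int) : Int :=
  ((PySem.List.pyRange 30 (-1) (-1)).foldl (fun (st : Int × List Int) bit =>
    let trial := st.2.map (fun (v : Int) =>
      if PySem.Int.band (v >>> bit.toNat) 1 ≠ 0 then v
      else (PySem.Int.bor (v >>> bit.toNat) 1) <<< bit.toNat)
    if (PySem.List.slice (PySem.List.sorted ((trial.zip numbers).map (fun p => p.1 - p.2)) id)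
          none (some count)).sum ≤ budget then
      (PySem.Int.bor st.1 ((1 : Int) <<< bit.toNat), trial)
    else st) (0, numbers)).1

-- ===== PRECONDITION & SPEC =====
def Spec_maximumAND (numbers : List Int) (budget : Int) (count : Int) (out : Int) : Prop := out = maximumAND_alt numbers budget count
instance (numbers : List Int) (budget : Int) (count : Int) (out : Int) : Decidable (Spec_maximumAND numbers budget count out) := by unfold Spec_maximumAND; infer_instance

-- ===== CLAIM (what is proved, stated in full; the proofs are below) =====
def Claim_equal_maximumAND : Prop := ∀ (numbers : List Int) (budget : Int) (count : Int), Dom_maximumAND numbers budget count → Spec_maximumAND numbers budget count (maximumAND numbers budget count)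

-- ===== LEMMAS AND PROOFS =====

-- Proof-side copies of the two loop bodies (definitionally equal to the ports' lambdas).
def pvABody (numbers : List Int) (budget count : Int) (result bit : Int) : Int :=
  let candidate := PySem.Int.bor result ((1 : Int) <<< bit.toNat)
  let upgradeCosts := numbers.foldl (fun acc value =>
    let st := (PySem.List.pyRange 30 (bit - 1) (-1)).foldl (fun (st : Int × Int) pos =>
      if PySem.Int.band (candidate >>> pos.toNat) 1 ≠ 0 ∧ PySem.Int.band (st.1 >>> pos.toNat) 1 = 0 then
        let nextValue := (PySem.Int.bor (st.1 >>> pos.toNat) 1) <<< pos.toNat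
        (nextValue, st.2 + (nextValue - st.1))
      else st) (value, 0)
    acc ++ [st.2]) []
  if (PySem.List.slice (PySem.List.sorted upgradeCosts id) none (some count)).sum ≤ budget then
    candidate
  else result

def pvBBody (numbers : List Int) (budget count : Int) (st : Int × List Int) (bit : Int) : Int × List Int :=
  let trial := st.2.map (fun (v : Int) =>
    if PySem.Int.band (v >>> (bit.toNat : Int)) 1 ≠ 0 then v
    else (PySem.Int.bor (v >>> (bit.toNat : Int)) 1) <<< (bit.toNat : Int))
  if (PySem.List.slice (PySem.List.sorted ((trial.zip numbers).map (fun p => p.1 - p.2)) id)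
        none (some count)).sum ≤ budget then
    (PySem.Int.bor st.1 ((1 : Int) <<< (bit.toNat : Int)), trial)
  else st

set_option maxRecDepth 4096 in
theorem maximumAND_eq (numbers : List Int) (budget count : Int) :
    maximumAND numbers budget count
      = (PySem.List.pyRange 30 (-1) (-1)).foldl (pvABody numbers budget count) 0 := rfl

set_option maxRecDepth 4096 in
theorem maximumAND_alt_eq (numbers : List Int) (budget count : Int) :
    maximumAND_alt numbers budget count
      = ((PySem.List.pyRange 30 (-1) (-1)).foldl (pvBBody numbers budget count) (0, numbers)).1 := rfl

-- One upgrade step at bit position p with mask m, and the canonical upgraded value.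
def pvE (p : Nat) (v : Int) : Int := (PySem.Int.bor (v >>> (p : Int)) 1) <<< (p : Int)
def pvStep (m : Int) (p : Nat) (v : Int) : Int :=
  if PySem.Int.band (m >>> (p : Int)) 1 ≠ 0 ∧ PySem.Int.band (v >>> (p : Int)) 1 = 0 then pvE p v else v
def pvAlt (p : Nat) (v : Int) : Int :=
  if PySem.Int.band (v >>> (p : Int)) 1 ≠ 0 then v else pvE p v
def pvUp (m : Int) (ps : List Int) (v : Int) : Int := ps.foldl (fun v p => pvStep m p.toNat v) v

-- Bridges between the Int-valued shift the ports elaborate to and the Nat-valued one.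
theorem pv_srr (v : Int) (k : Nat) : v >>> ((k : Int)) = v >>> k := by
  cases v <;> cases k <;> rfl

theorem pv_slr (v : Int) (k : Nat) : v <<< ((k : Int)) = v <<< k := by
  rw [Int.shiftLeft_eq_mul_pow, Int.shiftLeft_eq']

-- A's inner loop telescopes: the accumulated cost is (final upgraded value) - (original value).
theorem pvInnerA (m : Int) (ps : List Int) (v c0 : Int) :
    ps.foldl (fun (st : Int × Int) pos =>
      if PySem.Int.band (m >>> (pos.toNat : Int)) 1 ≠ 0 ∧ PySem.Int.band (st.1 >>> (pos.toNat : Int)) 1 = 0 then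
        ((PySem.Int.bor (st.1 >>> (pos.toNat : Int)) 1) <<< (pos.toNat : Int),
         st.2 + ((PySem.Int.bor (st.1 >>> (pos.toNat : Int)) 1) <<< (pos.toNat : Int) - st.1))
      else st) (v, c0)
    = (pvUp m ps v, c0 + (pvUp m ps v - v)) := by
  induction ps generalizing v c0 with
  | nil => simp [pvUp]
  | cons p ps ih =>
    simp only [List.foldl_cons]
    have hu : pvUp m (p :: ps) v = pvUp m ps (pvStep m p.toNat v) := rfl
    have hstep : (if PySem.Int.band (m >>> (p.toNat : Int)) 1 ≠ 0 ∧ PySem.Int.band (v >>> (p.toNat : Int)) 1 = 0 then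
        ((PySem.Int.bor (v >>> (p.toNat : Int)) 1) <<< (p.toNat : Int),
         c0 + ((PySem.Int.bor (v >>> (p.toNat : Int)) 1) <<< (p.toNat : Int) - v))
      else (v, c0)) = (pvStep m p.toNat v, c0 + (pvStep m p.toNat v - v)) := by
      by_cases h : PySem.Int.band (m >>> (p.toNat : Int)) 1 ≠ 0 ∧ PySem.Int.band (v >>> (p.toNat : Int)) 1 = 0
      · rw [if_pos h, show pvStep m p.toNat v = pvE p.toNat v from by unfold pvStep; rw [if_pos h]]
        rfl
      · rw [if_neg h, show pvStep m p.toNat v = v from by unfold pvStep; rw [if_neg h]]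
        exact Prod.ext rfl (by ring)
    rw [hstep, ih, hu]
    have harith : ∀ u w : Int, c0 + (w - v) + (u - w) = c0 + (u - v) := fun u w => by ring
    rw [harith]

theorem pvUp_congr (m m' : Int) (ps : List Int)
    (h : ∀ p ∈ ps, ∀ w : Int, pvStep m p.toNat w = pvStep m' p.toNat w)
    (v : Int) : pvUp m ps v = pvUp m' ps v := by
  induction ps generalizing v with
  | nil => rfl
  | cons p ps ih =>
    simp only [pvUp, List.foldl_cons] at *
    rw [h p (List.mem_cons_self) v]
    exact ih (fun q hq w => h q (List.mem_cons_of_mem _ hq) w) _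

theorem pvUp_append (m : Int) (ps : List Int) (q v : Int) :
    pvUp m (ps ++ [q]) v = pvStep m q.toNat (pvUp m ps v) := by
  simp [pvUp, List.foldl_append]

-- Nat: adding a power of two below the 2-adic valuation is a bitwise or.
theorem pv_nat_lor_two_pow (b n : Nat) (h : 2 ^ (b + 1) ∣ n) : n ||| 2 ^ b = n + 2 ^ b := by
  obtain ⟨k, rfl⟩ := h
  apply Nat.eq_of_testBit_eq
  intro i
  rcases lt_trichotomy i b with hi | rfl | hi
  · rw [Nat.testBit_lor, show 2 ^ (b + 1) * k + 2 ^ b = 2 ^ b + 2 ^ (b + 1) * k from Nat.add_comm _ _,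
      Nat.testBit_two_pow_add_gt hi]
    have : (2 ^ b).testBit i = false := by simp [Nat.testBit_two_pow]; omega
    simp [this]
  · rw [Nat.testBit_lor, show 2 ^ (i + 1) * k + 2 ^ i = 2 ^ i + 2 ^ (i + 1) * k from Nat.add_comm _ _,
      Nat.testBit_two_pow_add_eq]
    have h1 : (2 ^ (i + 1) * k).testBit i = false := by
      rw [show 2 ^ (i + 1) * k = k * 2 ^ (i + 1) from Nat.mul_comm _ _, Nat.testBit_mul_two_pow]
      simp
    simp [h1]
  · rw [Nat.testBit_lor]
    have h2 : (2 ^ b).testBit i = false := by simp [Nat.testBit_two_pow]; omega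
    rw [h2, Bool.or_false]
    obtain ⟨t, rfl⟩ : ∃ t, i = b + 1 + t := ⟨i - (b + 1), by omega⟩
    have e1 : 2 ^ (b + 1) * k + 2 ^ b = (2 * k + 1) * 2 ^ b := by ring
    have e2 : 2 ^ (b + 1) * k = 2 * k * 2 ^ b := by ring
    rw [e1, e2, Nat.testBit_mul_two_pow, Nat.testBit_mul_two_pow]
    have e3 : b + 1 + t - b = t + 1 := by omega
    simp only [e3, Nat.testBit_add_one]
    have e4 : (2 * k + 1) / 2 = k := by omega
    have e5 : 2 * k / 2 = k := by omega
    rw [e4, e5]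

theorem pv_bor_pow (b : Nat) (r : Int) (hr : 0 ≤ r) (hd : (2 : Int) ^ (b + 1) ∣ r) :
    PySem.Int.bor r ((1 : Int) <<< b) = r + 2 ^ b := by
  have h1 : (1 : Int) <<< b = ((2 ^ b : Nat) : Int) := by rw [Int.shiftLeft_eq']; push_cast; ring
  rw [h1, PySem.Int.bor_of_nonneg hr (by positivity)]
  obtain ⟨n, rfl⟩ := Int.eq_ofNat_of_zero_le hr
  have hd' : 2 ^ (b + 1) ∣ n := by
    rw [show ((2 : Int) ^ (b + 1)) = ((2 ^ (b + 1) : Nat) : Int) by push_cast; ring] at hd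
    exact_mod_cast hd
  rw [Int.toNat_natCast, Int.toNat_natCast, pv_nat_lor_two_pow b n hd']
  push_cast; ring

theorem pv_band_one (a : Int) : PySem.Int.band a 1 = a % 2 := by
  rw [PySem.Int.band_one, PySem.Int.mod_eq_emod_of_pos (by norm_num)]

theorem pv_shift_r (b : Nat) (k : Int) : ((2 : Int) ^ (b + 1) * k) >>> b = 2 * k := by
  rw [Int.shiftRight_eq_div_pow]
  rw [show (2 : Int) ^ (b + 1) * k = ((2 ^ b : Nat) : Int) * (2 * k) by push_cast; ring]
  rw [Int.mul_ediv_cancel_left _ (by positivity)]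

theorem pv_shift_c (b : Nat) (k : Int) : ((2 : Int) ^ (b + 1) * k + 2 ^ b) >>> b = 2 * k + 1 := by
  rw [Int.shiftRight_eq_div_pow]
  rw [show (2 : Int) ^ (b + 1) * k + 2 ^ b = ((2 ^ b : Nat) : Int) * (2 * k + 1) by push_cast; ring]
  rw [Int.mul_ediv_cancel_left _ (by positivity)]

theorem pv_shift_high (b t : Nat) (k : Int) :
    ((2 : Int) ^ (b + 1) * k + 2 ^ b) >>> (b + 1 + t) = ((2 : Int) ^ (b + 1) * k) >>> (b + 1 + t) := by
  rw [Int.shiftRight_eq_div_pow, Int.shiftRight_eq_div_pow]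
  rw [show (2 : Int) ^ (b + 1) * k + 2 ^ b = ((2 ^ b : Nat) : Int) * (2 * k + 1) by push_cast; ring]
  rw [show ((2 ^ (b + 1 + t) : Nat) : Int) = ((2 ^ b : Nat) : Int) * (2 * ((2 ^ t : Nat) : Int)) by push_cast; ring]
  rw [Int.mul_ediv_mul_of_pos _ _ (by positivity)]
  rw [show (2 : Int) ^ (b + 1) * k = ((2 ^ b : Nat) : Int) * (2 * k) by push_cast; ring]
  rw [Int.mul_ediv_mul_of_pos _ _ (by positivity)]
  rw [← Int.ediv_ediv_of_nonneg (by norm_num : (0 : Int) ≤ 2)]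
  rw [show (2 * k + 1) / 2 = k by omega]
  rw [← Int.ediv_ediv_of_nonneg (by norm_num : (0 : Int) ≤ 2)]
  rw [show 2 * k / 2 = k by omega]

theorem pv_peel (b : Nat) (hb : b ≤ 30) :
    PySem.List.pyRange 30 ((b : Int) - 1) (-1) = PySem.List.pyRange 30 (b : Int) (-1) ++ [(b : Int)] := by
  rw [PySem.List.pyRange_neg_one, PySem.List.pyRange_neg_one]
  have h1 : ((30 : Int) - ((b : Int) - 1)).toNat = (30 - b) + 1 := by omega
  have h2 : ((30 : Int) - (b : Int)).toNat = 30 - b := by omega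
  rw [h1, h2, List.range_succ, List.map_append]
  congr 1
  have h3 : (30 : Int) - ((30 - b : Nat) : Int) = (b : Int) := by omega
  simp [h3]

theorem pv_mem_ps (b : Nat) (p : Int) (hp : p ∈ PySem.List.pyRange 30 (b : Int) (-1)) :
    ∃ q : Nat, p = (q : Int) ∧ b < q := by
  rw [PySem.List.pyRange_neg_one] at hp
  simp only [List.mem_map, List.mem_range] at hp
  obtain ⟨k, hk, rfl⟩ := hp
  exact ⟨30 - k, by omega, by omega⟩

theorem pv_band_high (b q : Nat) (k : Int) (hq : b < q) :
    PySem.Int.band (((2 : Int) ^ (b + 1) * k + 2 ^ b) >>> ((q : Int))) 1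
      = PySem.Int.band (((2 : Int) ^ (b + 1) * k) >>> ((q : Int))) 1 := by
  rw [pv_srr, pv_srr]
  obtain ⟨t, rfl⟩ : ∃ t, q = b + 1 + t := ⟨q - (b + 1), by omega⟩
  rw [pv_shift_high]

theorem pvStep_cand (b : Nat) (k w : Int) :
    pvStep ((2 : Int) ^ (b + 1) * k + 2 ^ b) b w = pvAlt b w := by
  have h1 : PySem.Int.band (((2 : Int) ^ (b + 1) * k + 2 ^ b) >>> ((b : Int))) 1 = 1 := by
    rw [pv_srr, pv_band_one, pv_shift_c]; omega
  by_cases h : PySem.Int.band (w >>> ((b : Int))) 1 = 0 <;> simp [pvStep, pvAlt, h1, h]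

theorem pvStep_self (b : Nat) (k w : Int) :
    pvStep ((2 : Int) ^ (b + 1) * k) b w = w := by
  have h1 : PySem.Int.band (((2 : Int) ^ (b + 1) * k) >>> ((b : Int))) 1 = 0 := by
    rw [pv_srr, pv_band_one, pv_shift_r]; omega
  simp [pvStep, h1]

theorem pv_V1 (b : Nat) (hb : b ≤ 30) (k v : Int) :
    pvUp ((2 : Int) ^ (b + 1) * k + 2 ^ b) (PySem.List.pyRange 30 ((b : Int) - 1) (-1)) v
      = pvAlt b (pvUp ((2 : Int) ^ (b + 1) * k) (PySem.List.pyRange 30 (b : Int) (-1)) v) := by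
  rw [pv_peel b hb, pvUp_append]
  have hc : pvUp ((2 : Int) ^ (b + 1) * k + 2 ^ b) (PySem.List.pyRange 30 (b : Int) (-1)) v
      = pvUp ((2 : Int) ^ (b + 1) * k) (PySem.List.pyRange 30 (b : Int) (-1)) v := by
    apply pvUp_congr
    intro p hp w
    obtain ⟨q, rfl, hq⟩ := pv_mem_ps b p hp
    rw [Int.toNat_natCast]
    unfold pvStep
    rw [pv_band_high b q k hq]
  rw [hc, Int.toNat_natCast, pvStep_cand]

theorem pv_V2 (b : Nat) (hb : b ≤ 30) (k v : Int) :
    pvUp ((2 : Int) ^ (b + 1) * k) (PySem.List.pyRange 30 ((b : Int) - 1) (-1)) v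
      = pvUp ((2 : Int) ^ (b + 1) * k) (PySem.List.pyRange 30 (b : Int) (-1)) v := by
  rw [pv_peel b hb, pvUp_append, Int.toNat_natCast, pvStep_self]

theorem pv_zip_map (xs : List Int) (g : Int → Int) :
    (((xs.map g).zip xs).map (fun p => p.1 - p.2)) = xs.map (fun v => g v - v) := by
  induction xs with
  | nil => rfl
  | cons x xs ih => simp [ih]

theorem pvABody_costs (numbers : List Int) (c lo : Int) :
    numbers.foldl (fun acc value =>
      acc ++ [((PySem.List.pyRange 30 lo (-1)).foldl (fun (st : Int × Int) pos =>
        if PySem.Int.band (c >>> (pos.toNat : Int)) 1 ≠ 0 ∧ PySem.Int.band (st.1 >>> (pos.toNat : Int)) 1 = 0 then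
          ((PySem.Int.bor (st.1 >>> (pos.toNat : Int)) 1) <<< (pos.toNat : Int),
           st.2 + ((PySem.Int.bor (st.1 >>> (pos.toNat : Int)) 1) <<< (pos.toNat : Int) - st.1))
        else st) (value, 0)).2]) []
    = numbers.map (fun v => pvUp c (PySem.List.pyRange 30 lo (-1)) v - v) := by
  rw [PySem.List.foldl_congr_mem _ _
    (fun acc value => acc ++ [pvUp c (PySem.List.pyRange 30 lo (-1)) value - value]) _
    (fun acc x _ => by rw [pvInnerA, zero_add])]
  rw [PySem.List.foldl_append_singleton_eq_map, List.nil_append]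

theorem pvABody_eq (numbers : List Int) (budget count r bit : Int) :
    pvABody numbers budget count r bit =
      (if (PySem.List.slice (PySem.List.sorted
            (numbers.map (fun v =>
              pvUp (PySem.Int.bor r ((1 : Int) <<< bit.toNat)) (PySem.List.pyRange 30 (bit - 1) (-1)) v - v)) id)
            none (some count)).sum ≤ budget then
        PySem.Int.bor r ((1 : Int) <<< bit.toNat)
      else r) := by
  simp only [pvABody]
  rw [pvABody_costs]

-- One outer iteration: with the invariant, B's step tracks A's step and re-establishes the invariant.
theorem pvStepAB (numbers : List Int) (budget count : Int) (b : Nat) (hb : b ≤ 30)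
    (r : Int) (cur : List Int) (hr : 0 ≤ r) (hd : (2 : Int) ^ (b + 1) ∣ r)
    (hcur : cur = numbers.map (fun v => pvUp r (PySem.List.pyRange 30 (b : Int) (-1)) v)) :
    pvBBody numbers budget count (r, cur) (b : Int)
      = (pvABody numbers budget count r (b : Int),
         numbers.map (fun v =>
           pvUp (pvABody numbers budget count r (b : Int)) (PySem.List.pyRange 30 ((b : Int) - 1) (-1)) v))
    ∧ 0 ≤ pvABody numbers budget count r (b : Int)
    ∧ (2 : Int) ^ b ∣ pvABody numbers budget count r (b : Int) := by
  obtain ⟨k, hk⟩ := hd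
  have hborA : PySem.Int.bor r ((1 : Int) <<< ((b : Int)).toNat) = r + 2 ^ b := by
    rw [Int.toNat_natCast, pv_bor_pow b r hr ⟨k, hk⟩]
  have hborB : PySem.Int.bor r ((1 : Int) <<< ((((b : Int)).toNat : Nat) : Int)) = r + 2 ^ b := by
    rw [Int.toNat_natCast, pv_slr, pv_bor_pow b r hr ⟨k, hk⟩]
  have hA : pvABody numbers budget count r (b : Int)
      = (if (PySem.List.slice (PySem.List.sorted
            (numbers.map (fun v => pvUp (r + 2 ^ b) (PySem.List.pyRange 30 ((b : Int) - 1) (-1)) v - v)) id)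
            none (some count)).sum ≤ budget then r + 2 ^ b else r) := by
    rw [pvABody_eq, hborA]
  have htrial : cur.map (fun (v : Int) =>
      if PySem.Int.band (v >>> (((b : Int)).toNat : Int)) 1 ≠ 0 then v
      else (PySem.Int.bor (v >>> (((b : Int)).toNat : Int)) 1) <<< (((b : Int)).toNat : Int))
      = numbers.map (fun v => pvUp (r + 2 ^ b) (PySem.List.pyRange 30 ((b : Int) - 1) (-1)) v) := by
    have hfun : (fun (v : Int) =>
        if PySem.Int.band (v >>> (((b : Int)).toNat : Int)) 1 ≠ 0 then v
        else (PySem.Int.bor (v >>> (((b : Int)).toNat : Int)) 1) <<< (((b : Int)).toNat : Int))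
        = pvAlt b := by
      funext v; rw [Int.toNat_natCast]; rfl
    rw [hfun, hcur, List.map_map]
    apply List.map_congr_left
    intro v _
    simp only [Function.comp]
    rw [hk, pv_V1 b hb k v]
  simp only [pvBBody]
  rw [htrial, pv_zip_map, hborB]
  by_cases hcond : (PySem.List.slice (PySem.List.sorted
      (numbers.map (fun v => pvUp (r + 2 ^ b) (PySem.List.pyRange 30 ((b : Int) - 1) (-1)) v - v)) id)
      none (some count)).sum ≤ budget
  · have hval : pvABody numbers budget count r (b : Int) = r + 2 ^ b := by rw [hA, if_pos hcond]
    rw [if_pos hcond, hval]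
    exact ⟨rfl, by positivity, ⟨2 * k + 1, by rw [hk]; ring⟩⟩
  · have hval : pvABody numbers budget count r (b : Int) = r := by rw [hA, if_neg hcond]
    rw [if_neg hcond, hval]
    refine ⟨Prod.ext rfl ?_, hr, ⟨2 * k, by rw [hk]; ring⟩⟩
    rw [hcur]
    apply List.map_congr_left
    intro v _
    rw [hk, pv_V2 b hb k v]

theorem pvMain (numbers : List Int) (budget count : Int) :
    ∀ (b : Nat), b ≤ 30 → ∀ (r : Int) (cur : List Int), 0 ≤ r → (2 : Int) ^ (b + 1) ∣ r →
      cur = numbers.map (fun v => pvUp r (PySem.List.pyRange 30 (b : Int) (-1)) v) →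
      (PySem.List.pyRange (b : Int) (-1) (-1)).foldl (pvABody numbers budget count) r
        = ((PySem.List.pyRange (b : Int) (-1) (-1)).foldl (pvBBody numbers budget count) (r, cur)).1 := by
  intro b
  induction b with
  | zero =>
    intro _ r cur hr hd hcur
    have hlist : PySem.List.pyRange ((0 : Nat) : Int) (-1) (-1) = [((0 : Nat) : Int)] := by decide
    rw [hlist]
    simp only [List.foldl_cons, List.foldl_nil]
    obtain ⟨hB, _, _⟩ := pvStepAB numbers budget count 0 (by omega) r cur hr hd hcur
    rw [hB]
  | succ n ih =>
    intro hb r cur hr hd hcur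
    have hlist : PySem.List.pyRange (((n + 1 : Nat)) : Int) (-1) (-1)
        = ((n + 1 : Nat) : Int) :: PySem.List.pyRange (((n + 1 : Nat) : Int) - 1) (-1) (-1) := by
      exact PySem.List.pyRange_neg_one_cons (by push_cast; omega)
    rw [hlist]
    simp only [List.foldl_cons]
    obtain ⟨hB, hr', hd'⟩ := pvStepAB numbers budget count (n + 1) hb r cur hr hd hcur
    rw [hB]
    have hcast : (((n + 1 : Nat)) : Int) - 1 = ((n : Nat) : Int) := by push_cast; ring
    rw [hcast]
    exact ih (by omega) _ _ hr' hd' rfl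

-- ===== VERDICT (by name: the statement is the Claim_ definition above) =====
theorem maximumAND_spec : Claim_equal_maximumAND := by
  intro numbers budget count _
  unfold Spec_maximumAND
  rw [maximumAND_eq, maximumAND_alt_eq]
  have h30 : PySem.List.pyRange 30 (-1) (-1) = PySem.List.pyRange ((30 : Nat) : Int) (-1) (-1) := by norm_num
  rw [h30]
  refine pvMain numbers budget count 30 (le_refl 30) 0 numbers (le_refl 0) (dvd_zero _) ?_
  have hnil : PySem.List.pyRange 30 ((30 : Nat) : Int) (-1) = [] := by decide
  rw [show ((30 : Nat) : Int) = (30 : Int) from by norm_num] at hnil ⊢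
  rw [hnil]
  simp [pvUp]
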